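-- pv_equiv track=rewrite | github.com/Adewale-1/Abt_Global_1B | src/preprocessing/enhanced_feature_selection.py | categorize_features
-- ===== SOURCE A (Python) =====
-- def categorize_features(features):
--     """
--     Categorize selected features into types.
--     """
--     categories = {
--         "weather_base": [],
--         "weather_types": [],
--         "temporal": [],
--         "extreme_indicators": [],
--         "compound_risks": [],
--         "geographic": [],
--         "other": [],
--     }
--
--     for feature in features:
--         if any(
--             x in feature for x in ["AWND", "PRCP", "TMAX", "TMIN", "WSF2", "WSF5"]
--         ):
--             categories["weather_base"].append(feature)
--         elif feature.startswith("WT"):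
--             categories["weather_types"].append(feature)
--         elif any(
--             x in feature
--             for x in [
--                 "lag",
--                 "_3d_",
--                 "_7d_",
--                 "_14d_",
--                 "day_of_",
--                 "month",
--                 "year",
--                 "season",
--             ]
--         ):
--             categories["temporal"].append(feature)
--         elif any(
--             x in feature
--             for x in [
--                 "extreme",
--                 "heavy",
--                 "damaging",
--                 "high_winds",
--                 "freezing",
--                 "heat_wave",
--             ]
--         ):
--             categories["extreme_indicators"].append(feature)
--         elif any(
--             x in feature
--             for x in [
--                 "ice_storm",
--                 "wet_windy",
--                 "multiple_extremes",
--                 "thermal_stress",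
--                 "mechanical_stress",
--             ]
--         ):
--             categories["compound_risks"].append(feature)
--         elif any(
--             x in feature
--             for x in ["county", "fips", "state", "climate", "risk_profile"]
--         ):
--             categories["geographic"].append(feature)
--         else:
--             categories["other"].append(feature)
--
--     return categories
-- ===== SOURCE B (Python) =====
-- RULES = [
--     ("weather_base",
--      lambda f: any(x in f for x in ["AWND", "PRCP", "TMAX", "TMIN", "WSF2", "WSF5"])),
--     ("weather_types",
--      lambda f: f.startswith("WT")),
--     ("temporal",
--      lambda f: any(x in f for x in ["lag", "_3d_", "_7d_", "_14d_", "day_of_", "month", "year", "season"])),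
--     ("extreme_indicators",
--      lambda f: any(x in f for x in ["extreme", "heavy", "damaging", "high_winds", "freezing", "heat_wave"])),
--     ("compound_risks",
--      lambda f: any(x in f for x in ["ice_storm", "wet_windy", "multiple_extremes", "thermal_stress", "mechanical_stress"])),
--     ("geographic",
--      lambda f: any(x in f for x in ["county", "fips", "state", "climate", "risk_profile"])),
-- ]
--
--
-- def _classify(feature):
--     for name, pred in RULES:
--         if pred(feature):
--             return name
--     return "other"
--
--
-- def categorize_features(features):
--     names = [name for name, _ in RULES] + ["other"]
--     labeled = [(f, _classify(f)) for f in features]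
--     return {c: [f for f, label in labeled if label == c] for c in names}
-- ===== Notes on version B (the rewrite author's own statement) =====
-- stated objective: alternative
-- what changed: A's single pass with a hard-coded if/elif ladder appending into a mutable dict is replaced by a data-driven (category, predicate) rules table with a first-match classifier and a per-category filter comprehension building the result dict.
import Mathlib
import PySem

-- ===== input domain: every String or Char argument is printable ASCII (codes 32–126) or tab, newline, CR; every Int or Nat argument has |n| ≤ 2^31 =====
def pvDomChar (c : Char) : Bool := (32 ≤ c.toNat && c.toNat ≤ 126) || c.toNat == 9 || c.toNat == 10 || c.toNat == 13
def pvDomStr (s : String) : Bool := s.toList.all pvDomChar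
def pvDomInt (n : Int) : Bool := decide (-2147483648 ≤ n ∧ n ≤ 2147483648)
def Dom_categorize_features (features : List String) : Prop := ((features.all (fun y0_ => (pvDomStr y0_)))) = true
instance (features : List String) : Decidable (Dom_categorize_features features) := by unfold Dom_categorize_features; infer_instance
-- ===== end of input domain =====

-- B replaces A's single pass with an if/elif ladder appending into a dict by a rules table
-- (category, predicate) and a per-category filter; objective: alternative decomposition, same cost.


-- ===== PORT A =====
def pvStepA (d : PySem.Dict String (List String)) (feature : String) : PySem.Dict String (List String) :=
  if (["AWND", "PRCP", "TMAX", "TMIN", "WSF2", "WSF5"].any (fun x => PySem.Str.isIn x feature)) then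
    d.modify "weather_base" [] (· ++ [feature])
  else if PySem.Str.startswith feature "WT" then
    d.modify "weather_types" [] (· ++ [feature])
  else if (["lag", "_3d_", "_7d_", "_14d_", "day_of_", "month", "year", "season"].any (fun x => PySem.Str.isIn x feature)) then
    d.modify "temporal" [] (· ++ [feature])
  else if (["extreme", "heavy", "damaging", "high_winds", "freezing", "heat_wave"].any (fun x => PySem.Str.isIn x feature)) then
    d.modify "extreme_indicators" [] (· ++ [feature])
  else if (["ice_storm", "wet_windy", "multiple_extremes", "thermal_stress", "mechanical_stress"].any (fun x => PySem.Str.isIn x feature)) then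
    d.modify "compound_risks" [] (· ++ [feature])
  else if (["county", "fips", "state", "climate", "risk_profile"].any (fun x => PySem.Str.isIn x feature)) then
    d.modify "geographic" [] (· ++ [feature])
  else
    d.modify "other" [] (· ++ [feature])

def categorize_features (features : List String) : List (String × List String) :=
  (features.foldl pvStepA (PySem.Dict.mk
    [("weather_base", []), ("weather_types", []), ("temporal", []),
     ("extreme_indicators", []), ("compound_risks", []), ("geographic", []), ("other", [])])).items

-- ===== PORT B =====
def pvRules : List (String × (String → Bool)) :=
  [("weather_base", fun f => ["AWND", "PRCP", "TMAX", "TMIN", "WSF2", "WSF5"].any (fun x => PySem.Str.isIn x f)),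
   ("weather_types", fun f => PySem.Str.startswith f "WT"),
   ("temporal", fun f => ["lag", "_3d_", "_7d_", "_14d_", "day_of_", "month", "year", "season"].any (fun x => PySem.Str.isIn x f)),
   ("extreme_indicators", fun f => ["extreme", "heavy", "damaging", "high_winds", "freezing", "heat_wave"].any (fun x => PySem.Str.isIn x f)),
   ("compound_risks", fun f => ["ice_storm", "wet_windy", "multiple_extremes", "thermal_stress", "mechanical_stress"].any (fun x => PySem.Str.isIn x f)),
   ("geographic", fun f => ["county", "fips", "state", "climate", "risk_profile"].any (fun x => PySem.Str.isIn x f))]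

def pvClassify (feature : String) : String :=
  ((pvRules.find? (fun r => r.2 feature)).map Prod.fst).getD "other"

def categorize_features_alt (features : List String) : List (String × List String) :=
  let labeled := features.map (fun f => (f, pvClassify f))
  ((pvRules.map Prod.fst) ++ ["other"]).map
    (fun c => (c, (labeled.filter (fun p => p.2 == c)).map Prod.fst))

-- ===== PRECONDITION & SPEC =====
def Spec_categorize_features (features : List String) (out : List (String × List String)) : Prop := out = categorize_features_alt features
instance (features : List String) (out : List (String × List String)) : Decidable (Spec_categorize_features features out) := by unfold Spec_categorize_features; infer_instance

-- ===== CLAIM (what is proved, stated in full; the proofs are below) =====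
def Claim_equal_categorize_features : Prop := ∀ (features : List String), Dom_categorize_features features → Spec_categorize_features features (categorize_features features)

-- ===== LEMMAS AND PROOFS =====

-- A's ladder step is "append to the bucket B's classifier names".
theorem pvStepA_eq (d : PySem.Dict String (List String)) (f : String) :
    pvStepA d f = d.modify (pvClassify f) [] (· ++ [f]) := by
  simp only [pvStepA, pvClassify, pvRules, List.find?]
  cases h1 : (["AWND", "PRCP", "TMAX", "TMIN", "WSF2", "WSF5"].any (fun x => PySem.Str.isIn x f)) <;>
    cases h2 : PySem.Str.startswith f "WT" <;>
    cases h3 : (["lag", "_3d_", "_7d_", "_14d_", "day_of_", "month", "year", "season"].any (fun x => PySem.Str.isIn x f)) <;>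
    cases h4 : (["extreme", "heavy", "damaging", "high_winds", "freezing", "heat_wave"].any (fun x => PySem.Str.isIn x f)) <;>
    cases h5 : (["ice_storm", "wet_windy", "multiple_extremes", "thermal_stress", "mechanical_stress"].any (fun x => PySem.Str.isIn x f)) <;>
    cases h6 : (["county", "fips", "state", "climate", "risk_profile"].any (fun x => PySem.Str.isIn x f)) <;>
    simp

-- B's classifier takes one of the eight category names.
theorem pvClassify_cases (f : String) :
    pvClassify f = "weather_base" ∨ pvClassify f = "weather_types" ∨ pvClassify f = "temporal" ∨
    pvClassify f = "extreme_indicators" ∨ pvClassify f = "compound_risks" ∨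
    pvClassify f = "geographic" ∨ pvClassify f = "other" := by
  simp only [pvClassify, pvRules, List.find?]
  cases h1 : (["AWND", "PRCP", "TMAX", "TMIN", "WSF2", "WSF5"].any (fun x => PySem.Str.isIn x f)) <;>
    cases h2 : PySem.Str.startswith f "WT" <;>
    cases h3 : (["lag", "_3d_", "_7d_", "_14d_", "day_of_", "month", "year", "season"].any (fun x => PySem.Str.isIn x f)) <;>
    cases h4 : (["extreme", "heavy", "damaging", "high_winds", "freezing", "heat_wave"].any (fun x => PySem.Str.isIn x f)) <;>
    cases h5 : (["ice_storm", "wet_windy", "multiple_extremes", "thermal_stress", "mechanical_stress"].any (fun x => PySem.Str.isIn x f)) <;>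
    cases h6 : (["county", "fips", "state", "climate", "risk_profile"].any (fun x => PySem.Str.isIn x f)) <;>
    simp

-- Loop invariant: A's fold over the seven-bucket dict appends, per bucket, exactly
-- the features B's classifier sends there.
theorem pvLoop (fs : List String) : ∀ (l1 l2 l3 l4 l5 l6 l7 : List String),
    (fs.foldl pvStepA (PySem.Dict.mk
      [("weather_base", l1), ("weather_types", l2), ("temporal", l3),
       ("extreme_indicators", l4), ("compound_risks", l5), ("geographic", l6), ("other", l7)])).items =
    [("weather_base", l1 ++ fs.filter (fun f => pvClassify f == "weather_base")),
     ("weather_types", l2 ++ fs.filter (fun f => pvClassify f == "weather_types")),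
     ("temporal", l3 ++ fs.filter (fun f => pvClassify f == "temporal")),
     ("extreme_indicators", l4 ++ fs.filter (fun f => pvClassify f == "extreme_indicators")),
     ("compound_risks", l5 ++ fs.filter (fun f => pvClassify f == "compound_risks")),
     ("geographic", l6 ++ fs.filter (fun f => pvClassify f == "geographic")),
     ("other", l7 ++ fs.filter (fun f => pvClassify f == "other"))] := by
  induction fs with
  | nil => intro l1 l2 l3 l4 l5 l6 l7; simp
  | cons f fs ih =>
    intro l1 l2 l3 l4 l5 l6 l7
    rw [List.foldl_cons, pvStepA_eq]
    rcases pvClassify_cases f with h | h | h | h | h | h | h <;>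
      rw [h] <;>
      simp [PySem.Dict.modify, PySem.Dict.insert, PySem.Dict.contains, PySem.Dict.get?,
        PySem.Dict.getD, ih, h]

-- Filtering the (feature, label) pairs by label and projecting is filtering by the classifier.
theorem pvLabeledFilter (fs : List String) (c : String) :
    (((fs.map (fun f => (f, pvClassify f))).filter (fun p => p.2 == c)).map Prod.fst)
      = fs.filter (fun f => pvClassify f == c) := by
  induction fs with
  | nil => rfl
  | cons f fs ih => by_cases h : pvClassify f == c <;> simp [h, ih]

-- ===== VERDICT (by name: the statement is the Claim_ definition above) =====
theorem categorize_features_spec : Claim_equal_categorize_features := by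
  intro features _
  show categorize_features features = categorize_features_alt features
  rw [categorize_features, pvLoop]
  simp [categorize_features_alt, pvRules, pvLabeledFilter]
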